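-- pv_equiv track=rewrite | github.com/lockephi/Allentown-L104-Node | l104_quantum_magic.py | _unify_args
-- ===== SOURCE A (Python) =====
-- from typing import Dict, List, Any, Optional, Tuple, Callable, Set, Union
--
-- def _unify_args(pattern: Tuple, ground: Tuple) -> Optional[Dict]:
--     """Unify a pattern with ground terms"""
--     if len(pattern) != len(ground):
--         return None
--
--     bindings = {}
--     for p, g in zip(pattern, ground):
--         p_str = str(p)
--         if p_str.startswith('?'):
--             # Variable
--             var_name = p_str[1:]
--             if var_name in bindings:
--                 if bindings[var_name] != g:
--                     return None
--             else:
--                 bindings[var_name] = g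
--         else:
--             # Constant - must match
--             if p_str != str(g):
--                 return None
--
--     return bindings
-- ===== SOURCE B (Python) =====
-- def _unify_args(pattern, ground):
--     """Unify a pattern with ground terms (two-phase: constants first, then variables grouped by name)."""
--     if len(pattern) != len(ground):
--         return None
--     pairs = list(zip(pattern, ground))
--     # Phase 1: every constant position must match its ground term.
--     for p, g in pairs:
--         if not str(p).startswith('?') and str(p) != str(g):
--             return None
--     # Phase 2: group the ground terms of each variable name, in first-occurrence order.
--     groups = {}
--     for p, g in pairs:
--         ps = str(p)
--         if ps.startswith('?'):
--             groups.setdefault(ps[1:], []).append(g)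
--     # Phase 3: each variable's ground terms must all agree; bind each name to its first value.
--     for vs in groups.values():
--         if any(v != vs[0] for v in vs[1:]):
--             return None
--     return {name: vs[0] for name, vs in groups.items()}
-- ===== Notes on version B (the rewrite author's own statement) =====
-- stated objective: alternative
-- what changed: Replaces A's single-pass accumulation with interleaved conflict checks by three separate phases: a constants-match pass over the zipped pairs, a grouping of each variable's ground terms by name into a dict of lists, an all-equal consistency check per group, and finally binding each name to its group's first value.
import Mathlib
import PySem

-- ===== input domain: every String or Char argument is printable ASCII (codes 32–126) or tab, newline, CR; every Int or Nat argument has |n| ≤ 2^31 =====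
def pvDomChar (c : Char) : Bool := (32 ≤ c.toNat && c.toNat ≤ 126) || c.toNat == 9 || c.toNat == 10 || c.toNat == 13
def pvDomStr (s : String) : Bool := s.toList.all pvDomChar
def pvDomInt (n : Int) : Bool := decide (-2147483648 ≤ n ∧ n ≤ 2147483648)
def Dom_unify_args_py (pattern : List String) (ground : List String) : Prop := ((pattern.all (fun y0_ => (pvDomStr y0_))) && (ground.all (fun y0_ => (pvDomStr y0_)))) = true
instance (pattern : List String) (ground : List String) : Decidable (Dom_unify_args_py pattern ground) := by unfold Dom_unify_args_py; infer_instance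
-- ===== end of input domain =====

-- B restates A's single-pass unification as three phases (constant check, grouping by variable name,
-- per-group consistency + first-value bindings): an alternative decomposition, same asymptotic cost.

-- ===== PORT A =====
-- the 'for p, g in zip(pattern, ground)' loop of A, carrying the bindings dict
def unifyAgo : List (String × String) → PySem.Dict String String → Option (PySem.Dict String String)
  | [], bindings => some bindings
  | (p, g) :: rest, bindings =>
    if PySem.Str.startswith p "?" then
      -- variable: var_name = p_str[1:]
      let var_name := PySem.Str.slice p (some 1) none
      if bindings.contains var_name then
        -- bindings[var_name] (key present, so getD hits the stored value)
        if bindings.getD var_name "" ≠ g then none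
        else unifyAgo rest bindings
      else unifyAgo rest (bindings.insert var_name g)
    else
      -- constant - must match
      if p ≠ g then none
      else unifyAgo rest bindings

def unify_args_py (pattern : List String) (ground : List String) : Option (List (String × String)) :=
  if pattern.length ≠ ground.length then none
  else (unifyAgo (pattern.zip ground) PySem.Dict.empty).map (fun d => d.items)

-- ===== PORT B =====
def unify_args_py_alt (pattern : List String) (ground : List String) : Option (List (String × String)) :=
  if pattern.length ≠ ground.length then none
  else
    let pairs := pattern.zip ground
    -- Phase 1: every constant position must match
    if pairs.any (fun pg => !(PySem.Str.startswith pg.1 "?") && pg.1 != pg.2) then none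
    else
      -- Phase 2: groups.setdefault(name, []).append(g)
      let groups := pairs.foldl (fun d pg =>
        if PySem.Str.startswith pg.1 "?" then
          d.modify (PySem.Str.slice pg.1 (some 1) none) [] (fun vs => vs ++ [pg.2])
        else d) PySem.Dict.empty
      -- Phase 3: all values of a group equal its first (vs[0] on a nonempty group = headD)
      if groups.values.any (fun vs => vs.tail.any (fun v => v != vs.headD "")) then none
      else some (groups.items.map (fun kv => (kv.1, kv.2.headD "")))

-- ===== PRECONDITION & SPEC =====
def Spec_unify_args_py (pattern : List String) (ground : List String) (out : Option (List (String × String))) : Prop := out = unify_args_py_alt pattern ground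
instance (pattern : List String) (ground : List String) (out : Option (List (String × String))) : Decidable (Spec_unify_args_py pattern ground out) := by unfold Spec_unify_args_py; infer_instance

-- ===== CLAIM (what is proved, stated in full; the proofs are below) =====
def Claim_equal_unify_args_py : Prop := ∀ (pattern : List String) (ground : List String), Dom_unify_args_py pattern ground → Spec_unify_args_py pattern ground (unify_args_py pattern ground)

-- ===== LEMMAS AND PROOFS =====

-- variable pairs of the zipped list, with names already extracted
def pvVars (L : List (String × String)) : List (String × String) :=
  L.filterMap (fun pg => if PySem.Str.startswith pg.1 "?" then some (PySem.Str.slice pg.1 (some 1) none, pg.2) else none)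

-- the ground terms bound to name n, in order
def pvVals (V : List (String × String)) (n : String) : List String :=
  (V.filter (fun q => q.1 == n)).map (fun q => q.2)

-- processing only the variable pairs (names pre-extracted), A-style
def pvVarGo : List (String × String) → PySem.Dict String String → Option (PySem.Dict String String)
  | [], b => some b
  | (n, g) :: V, b =>
    if b.contains n then
      if b.getD n "" ≠ g then none else pvVarGo V b
    else pvVarGo V (b.insert n g)

-- first-occurrence extension of b by the variable pairs
def pvExt : List (String × String) → PySem.Dict String String → PySem.Dict String String
  | [], b => b
  | (n, g) :: V, b => if b.contains n then pvExt V b else pvExt V (b.insert n g)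

theorem pvAll_congr_mem {α : Type} {l : List α} {f g : α → Bool}
    (h : ∀ x ∈ l, f x = g x) : l.all f = l.all g := by
  induction l with
  | nil => rfl
  | cons x xs ih =>
    simp only [List.all_cons]
    rw [h x (by simp), ih (fun y hy => h y (by simp [hy]))]

theorem pvUnifyAgo_eq (L : List (String × String)) (b : PySem.Dict String String) :
    unifyAgo L b =
      if L.any (fun pg => !(PySem.Str.startswith pg.1 "?") && pg.1 != pg.2) then none
      else pvVarGo (pvVars L) b := by
  induction L generalizing b with
  | nil => simp [unifyAgo, pvVars, pvVarGo]
  | cons pg L ih =>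
    obtain ⟨p, g⟩ := pg
    cases hsw : PySem.Str.startswith p "?" with
    | true =>
      have hfm : pvVars ((p, g) :: L) = (PySem.Str.slice p (some 1) none, g) :: pvVars L := by
        simp only [pvVars, List.filterMap_cons, hsw, if_true]
      have hbad : (((p, g) :: L).any (fun pg => !(PySem.Str.startswith pg.1 "?") && pg.1 != pg.2))
          = L.any (fun pg => !(PySem.Str.startswith pg.1 "?") && pg.1 != pg.2) := by
        simp only [List.any_cons, hsw, Bool.not_true, Bool.false_and, Bool.false_or]
      simp only [unifyAgo, hsw, if_true, hbad, hfm, pvVarGo]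
      by_cases hc : b.contains (PySem.Str.slice p (some 1) none) = true
      · by_cases hne : b.getD (PySem.Str.slice p (some 1) none) "" = g
        · rw [if_pos hc, if_neg (not_not_intro hne), ih, if_pos hc, if_neg (not_not_intro hne)]
        · rw [if_pos hc, if_pos hne, if_pos hc, if_pos hne, ite_self]
      · rw [if_neg hc, ih, if_neg hc]
    | false =>
      have hfm : pvVars ((p, g) :: L) = pvVars L := by
        simp only [pvVars, List.filterMap_cons, hsw]
        rfl
      simp only [unifyAgo, hsw, Bool.false_eq_true, if_false, List.any_cons,
        Bool.not_false, Bool.true_and, hfm]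
      by_cases hpg : p = g
      · rw [if_neg (not_not_intro hpg), ih]
        simp only [show (p != g) = false from by simp [hpg], Bool.false_or]
      · rw [if_pos hpg]
        simp only [show (p != g) = true from by simp [hpg], Bool.true_or, if_true]
theorem pvVals_cons_self (n g : String) (V : List (String × String)) :
    pvVals ((n, g) :: V) n = g :: pvVals V n := by
  simp [pvVals]

theorem pvVals_cons_ne (n m g : String) (V : List (String × String)) (h : n ≠ m) :
    pvVals ((n, g) :: V) m = pvVals V m := by
  simp [pvVals, h]

theorem pvVarGo_eq (V : List (String × String)) (b : PySem.Dict String String) :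
    pvVarGo V b =
      if V.all (fun q => match b.get? q.1 with
                 | some w => w == q.2
                 | none => (pvVals V q.1).headD "" == q.2)
      then some (pvExt V b) else none := by
  induction V generalizing b with
  | nil => simp [pvVarGo, pvExt]
  | cons q V ih =>
    obtain ⟨n, g⟩ := q
    by_cases hc : b.contains n = true
    · obtain ⟨w, hw⟩ : ∃ w, b.get? n = some w := by
        rw [← Option.isSome_iff_exists, ← PySem.Dict.contains_eq_isSome_get?]; exact hc
      have hgd : b.getD n "" = w := PySem.Dict.getD_of_get?_eq_some b "" hw
      have hall : (V.all (fun q => match b.get? q.1 with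
            | some w => w == q.2
            | none => (pvVals ((n, g) :: V) q.1).headD "" == q.2))
          = (V.all (fun q => match b.get? q.1 with
            | some w => w == q.2
            | none => (pvVals V q.1).headD "" == q.2)) := by
        apply pvAll_congr_mem
        intro x hx
        cases hq : b.get? x.1 with
        | some v => simp
        | none =>
          have hne : n ≠ x.1 := by
            intro h; rw [← h, hw] at hq; cases hq
          simp [pvVals_cons_ne n x.1 g V hne]
    
      simp only [pvVarGo, pvExt, hc, if_true, List.all_cons, hw, hgd, hall]
      by_cases hwg : w = g
      · rw [if_neg (not_not_intro hwg), ih]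
        simp only [hwg, beq_self_eq_true, Bool.true_and]
      · rw [if_pos hwg]
        simp only [show (w == g) = false from beq_eq_false_iff_ne.mpr hwg,
          Bool.false_and, Bool.false_eq_true, if_false]
    · have hnone : b.get? n = none := by
        cases hq : b.get? n with
        | none => rfl
        | some v =>
          exfalso; apply hc
          rw [PySem.Dict.contains_eq_isSome_get?, hq]; rfl
      have hall : (V.all (fun q => match (b.insert n g).get? q.1 with
            | some w => w == q.2
            | none => (pvVals V q.1).headD "" == q.2))
          = (V.all (fun q => match b.get? q.1 with
            | some w => w == q.2
            | none => (pvVals ((n, g) :: V) q.1).headD "" == q.2)) := by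
        apply pvAll_congr_mem
        intro x hx
        rw [PySem.Dict.get?_insert]
        by_cases hxn : x.1 = n
        · rw [if_pos hxn, hxn, hnone, ← hxn]
          simp [pvVals_cons_self]
        · rw [if_neg hxn]
          cases hq : b.get? x.1 with
          | some v => simp
          | none => simp [pvVals_cons_ne n x.1 g V (fun h => hxn h.symm)]
      simp only [pvVarGo, pvExt, hc, Bool.false_eq_true, if_false, List.all_cons, hnone, ih,
        ← hall, pvVals_cons_self, List.headD_cons, beq_self_eq_true, Bool.true_and]

def pvGroupStep (d : PySem.Dict String (List String)) (q : String × String) : PySem.Dict String (List String) :=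
  d.modify q.1 [] (fun vs => vs ++ [q.2])

def pvGroups (V : List (String × String)) : PySem.Dict String (List String) :=
  V.foldl pvGroupStep PySem.Dict.empty

theorem pvGroups_foldl (L : List (String × String)) (d : PySem.Dict String (List String)) :
    L.foldl (fun d pg =>
        if PySem.Str.startswith pg.1 "?" then
          d.modify (PySem.Str.slice pg.1 (some 1) none) [] (fun vs => vs ++ [pg.2])
        else d) d
      = (pvVars L).foldl pvGroupStep d := by
  induction L generalizing d with
  | nil => simp [pvVars]
  | cons pg L ih =>
    obtain ⟨p, g⟩ := pg
    cases hsw : PySem.Str.startswith p "?" with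
    | true =>
      simp only [List.foldl_cons, hsw, if_true, pvVars, List.filterMap_cons]
      exact ih _
    | false =>
      simp only [List.foldl_cons, hsw, Bool.false_eq_true, if_false, pvVars, List.filterMap_cons]
      exact ih d

theorem pvGroups_getD (V : List (String × String)) (n : String) :
    (pvGroups V).getD n [] = pvVals V n := by
  unfold pvGroups pvGroupStep pvVals
  rw [PySem.Dict.getD_foldl_modify_append]
  simp

theorem pvGroups_keys (V : List (String × String)) :
    (pvGroups V).keys = PySem.Set.ofList (V.map (fun q => q.1)) := by
  unfold pvGroups pvGroupStep
  rw [PySem.Dict.keys_foldl_modify_key]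
  simp [PySem.Set.update_nil_left]

theorem pvGroups_nodup (V : List (String × String)) : (pvGroups V).keys.Nodup := by
  rw [pvGroups_keys]; exact PySem.Set.nodup_ofList _

theorem pvExt_get? (V : List (String × String)) (b : PySem.Dict String String) (n : String) :
    (pvExt V b).get? n = match b.get? n with
      | some w => some w
      | none => (pvVals V n).head? := by
  induction V generalizing b with
  | nil =>
    simp only [pvExt, pvVals, List.filter_nil, List.map_nil, List.head?_nil]
    cases b.get? n <;> rfl
  | cons q V ih =>
    obtain ⟨m, g⟩ := q
    by_cases hc : b.contains m = true
    · obtain ⟨w, hw⟩ : ∃ w, b.get? m = some w := by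
        rw [← Option.isSome_iff_exists, ← PySem.Dict.contains_eq_isSome_get?]; exact hc
      simp only [pvExt, hc, if_true, ih]
      cases hq : b.get? n with
      | some v => rfl
      | none =>
        have hne : m ≠ n := by intro h; rw [h, hq] at hw; cases hw
        rw [pvVals_cons_ne m n g V hne]
    · simp only [pvExt, hc, Bool.false_eq_true, if_false, ih]
      have hnone : b.get? m = none := by
        cases hq : b.get? m with
        | none => rfl
        | some v => exfalso; apply hc; rw [PySem.Dict.contains_eq_isSome_get?, hq]; rfl
      rw [PySem.Dict.get?_insert]
      by_cases hnm : n = m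
      · rw [if_pos hnm, hnm, hnone, pvVals_cons_self]
        rfl
      · rw [if_neg hnm, pvVals_cons_ne m n g V (fun h => hnm h.symm)]

theorem pvExt_keys (V : List (String × String)) (b : PySem.Dict String String) :
    (pvExt V b).keys = PySem.Set.update b.keys (V.map (fun q => q.1)) := by
  induction V generalizing b with
  | nil => simp [pvExt, PySem.Set.update_nil]
  | cons q V ih =>
    obtain ⟨m, g⟩ := q
    by_cases hc : b.contains m = true
    · have hm : m ∈ b.keys := (PySem.Dict.contains_iff_mem_keys b m).mp hc
      simp only [pvExt, hc, if_true, ih, List.map_cons,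
        PySem.Set.update_cons, PySem.Set.add_of_mem hm]
    · have hm : m ∉ b.keys := fun h => hc ((PySem.Dict.contains_iff_mem_keys b m).mpr h)
      have hcf : b.contains m = false := by
        cases h : b.contains m with
        | false => rfl
        | true => exact absurd h hc
      simp only [pvExt, hc, Bool.false_eq_true, if_false, ih, List.map_cons,
        PySem.Set.update_cons, PySem.Set.add_of_not_mem hm,
        PySem.Dict.keys_insert_of_not_contains b g hcf]

theorem pvExt_nodup (V : List (String × String)) (b : PySem.Dict String String)
    (h : b.keys.Nodup) : (pvExt V b).keys.Nodup := by
  rw [pvExt_keys]; exact PySem.Set.nodup_update _ _ h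

theorem pvItems_eq (V : List (String × String)) :
    (pvExt V PySem.Dict.empty).items
      = (pvGroups V).items.map (fun kv => (kv.1, kv.2.headD "")) := by
  rw [PySem.Dict.items_eq_map_keys _ (pvExt_nodup V _ (by simp [PySem.Dict.keys_empty])) "",
    PySem.Dict.items_eq_map_keys _ (pvGroups_nodup V) []]
  rw [pvExt_keys, pvGroups_keys, List.map_map]
  simp only [PySem.Dict.keys_empty, PySem.Set.update_nil_left]
  apply List.map_congr_left
  intro n hn
  simp only [Function.comp_apply, pvGroups_getD]
  congr 1
  rw [PySem.Dict.getD_eq_get?_getD, pvExt_get?, PySem.Dict.get?_empty]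
  cases pvVals V n <;> rfl

theorem pvVals_mem (V : List (String × String)) (q : String × String) (h : q ∈ V) :
    q.2 ∈ pvVals V q.1 := by
  unfold pvVals
  exact List.mem_map_of_mem (List.mem_filter.mpr ⟨h, by simp⟩)

theorem pvVals_mem_rev (V : List (String × String)) (n v : String) (h : v ∈ pvVals V n) :
    (n, v) ∈ V := by
  unfold pvVals at h
  obtain ⟨q, hq, hv⟩ := List.mem_map.mp h
  have := List.mem_filter.mp hq
  have h1 : q.1 = n := by simpa using this.2
  have : q = (n, v) := by cases q; simp_all
  rw [← this]; exact (List.mem_filter.mp hq).1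

theorem pvCheck_eq (V : List (String × String)) :
    ((pvGroups V).values.any (fun vs => vs.tail.any (fun v => v != vs.headD "")))
      = !(V.all (fun q => (pvVals V q.1).headD "" == q.2)) := by
  rw [PySem.Dict.values_eq_map_keys _ (pvGroups_nodup V) [], List.any_map]
  rw [Bool.eq_iff_iff]
  simp only [List.any_eq_true, Function.comp_apply, pvGroups_getD]
  constructor
  · rintro ⟨n, hn, v, hv, hne⟩
    cases hall : V.all (fun q => (pvVals V q.1).headD "" == q.2) with
    | false => simp
    | true =>
      exfalso
      have hq : (n, v) ∈ V := pvVals_mem_rev V n v (List.mem_of_mem_tail hv)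
      have h2 := List.all_eq_true.mp hall (n, v) hq
      simp only [beq_iff_eq] at h2
      rw [bne_iff_ne] at hne
      exact hne h2.symm
  · intro h
    have hall : V.all (fun q => (pvVals V q.1).headD "" == q.2) = false := by
      cases hall : V.all (fun q => (pvVals V q.1).headD "" == q.2) with
      | false => rfl
      | true => rw [hall] at h; cases h
    have hnall : ¬ (∀ q ∈ V, ((pvVals V q.1).headD "" == q.2) = true) := by
      intro hforall
      rw [List.all_eq_true.mpr hforall] at hall
      cases hall
    rw [Classical.not_forall] at hnall
    obtain ⟨q, hnq⟩ := hnall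
    rw [Classical.not_imp] at hnq
    have hnall : ∃ q ∈ V, ((pvVals V q.1).headD "" == q.2) ≠ true := ⟨q, hnq.1, hnq.2⟩
    obtain ⟨q, hq, hpf⟩ := hnall
    refine ⟨q.1, ?_, ?_⟩
    · rw [pvGroups_keys]
      have : q.1 ∈ V.map (fun q => q.1) := List.mem_map_of_mem hq
      exact (PySem.Set.mem_ofList _ _).mpr this
    · have hv : q.2 ∈ pvVals V q.1 := pvVals_mem V q hq
      have hne : (pvVals V q.1).headD "" ≠ q.2 := by simpa using hpf
      cases hvl : pvVals V q.1 with
      | nil => rw [hvl] at hv; cases hv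
      | cons hd t =>
        rw [hvl] at hv hne
        simp only [List.headD_cons] at hne
        refine ⟨q.2, ?_, ?_⟩
        · simp only [List.tail_cons]
          rcases List.mem_cons.mp hv with h1 | h1
          · exact absurd h1.symm hne
          · exact h1
        · simp only [List.headD_cons, bne_iff_ne, ne_eq]
          exact fun hh => hne hh.symm

theorem unify_args_py_spec : Claim_equal_unify_args_py := by
  intro pattern ground _
  unfold Spec_unify_args_py
  simp only [unify_args_py, unify_args_py_alt]
  by_cases hlen : pattern.length ≠ ground.length
  · rw [if_pos hlen, if_pos hlen]
  · rw [if_neg hlen, if_neg hlen]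
    rw [pvUnifyAgo_eq, pvGroups_foldl,
      show (pvVars (pattern.zip ground)).foldl pvGroupStep PySem.Dict.empty
        = pvGroups (pvVars (pattern.zip ground)) from rfl]
    cases hbad : (pattern.zip ground).any
        (fun pg => !(PySem.Str.startswith pg.1 "?") && pg.1 != pg.2) with
    | true => rw [if_pos rfl, if_pos rfl]; rfl
    | false =>
      rw [if_neg (by decide), if_neg (by decide)]
      rw [pvVarGo_eq]
      have hpred : ((pvVars (pattern.zip ground)).all (fun q =>
          match PySem.Dict.empty.get? q.1 with
          | some w => w == q.2
          | none => (pvVals (pvVars (pattern.zip ground)) q.1).headD "" == q.2))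
          = (pvVars (pattern.zip ground)).all (fun q =>
              (pvVals (pvVars (pattern.zip ground)) q.1).headD "" == q.2) := by
        apply pvAll_congr_mem
        intro x hx
        rw [PySem.Dict.get?_empty]
      rw [hpred]
      simp only [pvCheck_eq]
      cases hall : (pvVars (pattern.zip ground)).all (fun q =>
          (pvVals (pvVars (pattern.zip ground)) q.1).headD "" == q.2) with
      | true =>
        rw [if_pos rfl, if_neg (by decide)]
        simp only [Option.map_some]
        exact congrArg some (pvItems_eq _)
      | false =>
        rw [if_neg (by decide), if_pos (by decide)]
        rfl
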